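-- pv_equiv track=rewrite | github.com/Quyenne07/HoangTrongQuyen_N21DCDT078_buoitapcuoiky | HoangTrongQuyen_N21DCDT078_baitapcuoiky/A_Cong_B_Advanced.py | Cong
-- ===== SOURCE A (Python) =====
-- MAX_DIGITS = 5  # Số lượng chữ số tối đa trước khi bị tràn
--
-- def Cong(a, b):
--     # Xác định dấu của kết quả
--     sign_a, sign_b = a[0], b[0]
--     sign = 0 if sign_a == sign_b else 1
--
--     # Chuyển sang số không dấu
--     digits_a, digits_b = a[1:], b[1:]
--     digits_a.reverse()
--     digits_b.reverse()
--
--     # Cộng hai số không dấu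
--     result_digits = []
--     carry = 0
--     max_len = MAX_DIGITS - 1
--     for i in range(max_len):
--         digit_a = digits_a[i] if i < len(digits_a) else 0
--         digit_b = digits_b[i] if i < len(digits_b) else 0
--         sum = digit_a + digit_b + carry
--         result_digits.append(sum % 10)
--         carry = sum // 10
--
--     # Kiểm tra tràn số
--     if carry or len(result_digits) > max_len:
--         return [sign, -1]
--
--     # Thêm dấu vào kết quả
--     result_digits.reverse()
--     result = [sign] + result_digits
--     return result
-- ===== SOURCE B (Python) =====
-- def Cong(a, b):
--     sign = 0 if a[0] == b[0] else 1
--     va = 0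
--     for d in a[1:][-4:]:
--         va = va * 10 + d
--     vb = 0
--     for d in b[1:][-4:]:
--         vb = vb * 10 + d
--     v = va + vb
--     if v < 0 or v >= 10000:
--         return [sign, -1]
--     return [sign, v // 1000, v // 100 % 10, v // 10 % 10, v % 10]
-- ===== Notes on version B (the rewrite author's own statement) =====
-- stated objective: simpler
-- what changed: Replaces A's reverse-both-lists and 4-step carry-propagation loop by folding each operand's last four digits into a single integer, adding once, and decomposing the sum into digits with closed-form //- and %-expressions; overflow becomes a plain range test on the sum.
import Mathlib
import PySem

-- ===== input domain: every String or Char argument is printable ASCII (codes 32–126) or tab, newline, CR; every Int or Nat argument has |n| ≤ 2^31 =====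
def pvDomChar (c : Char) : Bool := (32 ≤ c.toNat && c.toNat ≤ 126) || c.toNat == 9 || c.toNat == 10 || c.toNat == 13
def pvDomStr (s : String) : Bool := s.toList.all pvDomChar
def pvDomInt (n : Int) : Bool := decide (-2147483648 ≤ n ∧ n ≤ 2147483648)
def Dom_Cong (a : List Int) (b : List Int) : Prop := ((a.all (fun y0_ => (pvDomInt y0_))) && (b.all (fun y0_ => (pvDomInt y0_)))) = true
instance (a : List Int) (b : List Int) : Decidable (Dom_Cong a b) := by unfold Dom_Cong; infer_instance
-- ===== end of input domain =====

-- B replaces A's reverse-and-carry digit loop by evaluating each operand's last-4-digit value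
-- as one integer and decomposing the sum in closed form (objective: simpler).

-- ===== PORT A =====
def MAX_DIGITS : Int := 5

def Cong (a : List Int) (b : List Int) : List Int :=
  let sign_a := PySem.List.pyGetD a 0 0
  let sign_b := PySem.List.pyGetD b 0 0
  let sign : Int := if sign_a == sign_b then 0 else 1
  let digits_a := (PySem.List.slice a (some 1) none).reverse
  let digits_b := (PySem.List.slice b (some 1) none).reverse
  let max_len : Int := MAX_DIGITS - 1
  let st := (PySem.List.pyRange 0 max_len 1).foldl
    (fun (st : List Int × Int) i =>
      let digit_a := if i < (digits_a.length : Int) then PySem.List.pyGetD digits_a i 0 else 0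
      let digit_b := if i < (digits_b.length : Int) then PySem.List.pyGetD digits_b i 0 else 0
      let sum := digit_a + digit_b + st.2
      (st.1 ++ [PySem.Int.mod sum 10], PySem.Int.floordiv sum 10))
    ([], 0)
  if st.2 ≠ 0 ∨ (st.1.length : Int) > max_len then [sign, -1]
  else [sign] ++ st.1.reverse

-- ===== PORT B =====
def Cong_alt (a : List Int) (b : List Int) : List Int :=
  let sign : Int := if PySem.List.pyGetD a 0 0 == PySem.List.pyGetD b 0 0 then 0 else 1
  let va := (PySem.List.slice (PySem.List.slice a (some 1) none) (some (-4)) none).foldl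
    (fun v d => v * 10 + d) 0
  let vb := (PySem.List.slice (PySem.List.slice b (some 1) none) (some (-4)) none).foldl
    (fun v d => v * 10 + d) 0
  let v := va + vb
  if v < 0 ∨ v ≥ 10000 then [sign, -1]
  else [sign, PySem.Int.floordiv v 1000,
        PySem.Int.mod (PySem.Int.floordiv v 100) 10,
        PySem.Int.mod (PySem.Int.floordiv v 10) 10,
        PySem.Int.mod v 10]

-- ===== PRECONDITION & SPEC =====
-- Pre_ excludes only empty operands, on which A raises IndexError at a[0] / b[0].
def Pre_Cong (a : List Int) (b : List Int) : Prop := a ≠ [] ∧ b ≠ []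
instance (a : List Int) (b : List Int) : Decidable (Pre_Cong a b) := by unfold Pre_Cong; infer_instance
def pvWitness_Cong : List Int × List Int := ([0, 1, 2], [1, 9, 9])

def Spec_Cong (a : List Int) (b : List Int) (out : List Int) : Prop := out = Cong_alt a b
instance (a : List Int) (b : List Int) (out : List Int) : Decidable (Spec_Cong a b out) := by unfold Spec_Cong; infer_instance

-- ===== CLAIM (what is proved, stated in full; the proofs are below) =====
def Claim_equal_Cong : Prop := ∀ (a : List Int) (b : List Int), Dom_Cong a b → Pre_Cong a b → Spec_Cong a b (Cong a b)

-- ===== LEMMAS AND PROOFS =====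

-- big-endian fold of the first 4 elements of r.reverse, expressed via getD on r
theorem foldl_take4_reverse (r : List Int) :
    ((r.take 4).reverse).foldl (fun v d => v * 10 + d) 0 =
      1000 * r.getD 3 0 + 100 * r.getD 2 0 + 10 * r.getD 1 0 + r.getD 0 0 := by
  match r with
  | [] => simp
  | [x0] => simp [List.foldl]
  | [x0, x1] => simp [List.foldl]; ring
  | [x0, x1, x2] => simp [List.foldl]; ring
  | x0 :: x1 :: x2 :: x3 :: t => simp [List.take, List.foldl]; ring

theorem Cong_spec : Claim_equal_Cong := by
  intro a b _ _
  unfold Spec_Cong Cong Cong_alt MAX_DIGITS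
  have hslice : ∀ xs : List Int,
      PySem.List.slice (PySem.List.slice xs (some 1) none) (some (-4)) none
        = (xs.tail.reverse.take 4).reverse := by
    intro xs
    rw [PySem.List.slice_from_one, PySem.List.slice_from_neg_ofNat _ 4 (by norm_num),
      List.reverse_take]
    simp
  have d0 : ∀ r : List Int, (if (0:Int) < (r.length:Int) then PySem.List.pyGetD r 0 0 else 0) = r.getD 0 0 := by
    intro r; split_ifs with h
    · simp [pysem, PySem.List.pyGetD, List.getD]
    · rw [List.getD_eq_default]; omega
  have d1 : ∀ r : List Int, (if (1:Int) < (r.length:Int) then PySem.List.pyGetD r 1 0 else 0) = r.getD 1 0 := by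
    intro r; split_ifs with h
    · simp [pysem, PySem.List.pyGetD, List.getD]
    · rw [List.getD_eq_default]; omega
  have d2 : ∀ r : List Int, (if (2:Int) < (r.length:Int) then PySem.List.pyGetD r 2 0 else 0) = r.getD 2 0 := by
    intro r; split_ifs with h
    · simp [pysem, PySem.List.pyGetD, List.getD]
    · rw [List.getD_eq_default]; omega
  have d3 : ∀ r : List Int, (if (3:Int) < (r.length:Int) then PySem.List.pyGetD r 3 0 else 0) = r.getD 3 0 := by
    intro r; split_ifs with h
    · simp [pysem, PySem.List.pyGetD, List.getD]
    · rw [List.getD_eq_default]; omega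
  rw [hslice a, hslice b, foldl_take4_reverse, foldl_take4_reverse,
    PySem.List.slice_from_one, PySem.List.slice_from_one]
  simp only [show (5:Int)-1 = 4 from rfl,
    show PySem.List.pyRange 0 4 1 = [0,1,2,3] from rfl, List.foldl]
  simp only [d0, d1, d2, d3]
  generalize a.tail.reverse.getD 0 0 = a0
  generalize a.tail.reverse.getD 1 0 = a1
  generalize a.tail.reverse.getD 2 0 = a2
  generalize a.tail.reverse.getD 3 0 = a3
  generalize b.tail.reverse.getD 0 0 = b0
  generalize b.tail.reverse.getD 1 0 = b1
  generalize b.tail.reverse.getD 2 0 = b2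
  generalize b.tail.reverse.getD 3 0 = b3
  simp only [List.nil_append, List.reverse_cons, List.reverse_nil,
    List.length_cons, List.length_nil, List.cons_append,
    PySem.Int.floordiv_eq_ediv_of_pos (by norm_num : (0:Int) < 10),
    PySem.Int.floordiv_eq_ediv_of_pos (by norm_num : (0:Int) < 100),
    PySem.Int.floordiv_eq_ediv_of_pos (by norm_num : (0:Int) < 1000),
    PySem.Int.mod_eq_emod_of_pos (by norm_num : (0:Int) < 10)]
  split_ifs <;>
    first
      | rfl
      | (exfalso; omega)
      | (simp only [List.cons.injEq]; and_intros <;> first | rfl | trivial | omega)
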